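-- pv_equiv track=rewrite | github.com/justniicolas/NSI-BAC | BAC 2023/Epreuve pratique Correction/Sujet 1/Exercice 2.py | vainqueur
-- ===== SOURCE A (Python) =====
-- def vainqueur(election):
--     nmax = 0
--     for candidat in election:
--         if election[candidat] > nmax:
--             nmax = election[candidat]
--             vainqueur = candidat
--     liste_finale = [nom for nom in election if election[nom] == nmax]
--     return liste_finale
-- ===== SOURCE B (Python) =====
-- def vainqueur(election):
--     nmax = 0
--     gagnants = []
--     for candidat, voix in election.items():
--         if voix > nmax:
--             nmax = voix
--             gagnants = [candidat]
--         elif voix == nmax: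
--             gagnants.append(candidat)
--     return gagnants
-- ===== Notes on version B (the rewrite author's own statement) =====
-- stated objective: simpler
-- what changed: Replaces A's two passes (a max-accumulating loop followed by a filtering comprehension that re-looks-up each key) by a single pass that maintains the running maximum together with the current list of leaders, resetting the list when a strictly larger vote count appears.
import Mathlib
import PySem

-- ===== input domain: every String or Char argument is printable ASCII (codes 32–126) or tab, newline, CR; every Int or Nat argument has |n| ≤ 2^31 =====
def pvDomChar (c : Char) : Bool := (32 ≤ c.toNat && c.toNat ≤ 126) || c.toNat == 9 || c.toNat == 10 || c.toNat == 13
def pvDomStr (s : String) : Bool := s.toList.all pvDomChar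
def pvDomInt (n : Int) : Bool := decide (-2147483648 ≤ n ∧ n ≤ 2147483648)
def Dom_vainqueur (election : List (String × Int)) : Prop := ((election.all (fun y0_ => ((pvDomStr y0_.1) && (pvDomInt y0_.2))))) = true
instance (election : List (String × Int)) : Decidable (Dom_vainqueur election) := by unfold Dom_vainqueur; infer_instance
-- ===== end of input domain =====

-- B replaces A's two passes (max loop + filtering comprehension) by one pass keeping the
-- running maximum and the current leader list (objective: simpler).


-- ===== PORT A =====
-- 'election' is a Python dict: build PySem.Dict.ofList (dict(...) semantics on duplicate keys).
-- 'for candidat in election' iterates the keys; 'election[candidat]' for an iterated key is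
-- exactly the value paired with it in d.items, so the loop folds over d.items.
-- The variable 'vainqueur' assigned inside the loop is dead in A (only liste_finale is returned).
def vainqueur (election : List (String × Int)) : List String :=
  let d := PySem.Dict.ofList election
  let nmax := d.items.foldl (fun m p => if p.2 > m then p.2 else m) 0
  (d.items.filter (fun p => p.2 == nmax)).map (·.1)

-- ===== PORT B =====
-- single pass over d.items with state (nmax, gagnants)
def vainqueurAltGo (l : List (String × Int)) (nmax : Int) (gagnants : List String) : List String :=
  match l with
  | [] => gagnants
  | (c, v) :: t =>
    if v > nmax then vainqueurAltGo t v [c]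
    else if v == nmax then vainqueurAltGo t nmax (gagnants ++ [c])
    else vainqueurAltGo t nmax gagnants

def vainqueur_alt (election : List (String × Int)) : List String :=
  let d := PySem.Dict.ofList election
  vainqueurAltGo d.items 0 []

-- ===== PRECONDITION & SPEC =====
def Spec_vainqueur (election : List (String × Int)) (out : List String) : Prop := out = vainqueur_alt election
instance (election : List (String × Int)) (out : List String) : Decidable (Spec_vainqueur election out) := by unfold Spec_vainqueur; infer_instance

-- ===== CLAIM (what is proved, stated in full; the proofs are below) =====
def Claim_equal_vainqueur : Prop := ∀ (election : List (String × Int)), Dom_vainqueur election → Spec_vainqueur election (vainqueur election)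

-- ===== LEMMAS AND PROOFS =====

def pvFmax (l : List (String × Int)) (n : Int) : Int :=
  l.foldl (fun m p => if p.2 > m then p.2 else m) n

theorem pvFmax_le (l : List (String × Int)) (n : Int) : n ≤ pvFmax l n := by
  induction l generalizing n with
  | nil => simp [pvFmax]
  | cons p t ih =>
    simp only [pvFmax, List.foldl_cons]
    by_cases h : p.2 > n
    · simp only [if_pos h]
      exact le_trans (le_of_lt h) (ih p.2)
    · simp only [if_neg h]; exact ih n

theorem vainqueurAltGo_spec (l : List (String × Int)) (n : Int) (r : List String) :
    vainqueurAltGo l n r =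
      (if pvFmax l n = n then r else []) ++ (l.filter (fun p => p.2 == pvFmax l n)).map (·.1) := by
  induction l generalizing n r with
  | nil => simp [vainqueurAltGo, pvFmax]
  | cons p t ih =>
    obtain ⟨c, v⟩ := p
    have hfm : pvFmax ((c, v) :: t) n = pvFmax t (if v > n then v else n) := by
      simp [pvFmax]
    by_cases h1 : v > n
    · have hM : pvFmax ((c, v) :: t) n = pvFmax t v := by rw [hfm, if_pos h1]
      have hvM : v ≤ pvFmax t v := pvFmax_le t v
      have hnM : ¬ pvFmax t v = n := by omega
      rw [show vainqueurAltGo ((c, v) :: t) n r = vainqueurAltGo t v [c] by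
        simp [vainqueurAltGo, h1]]
      rw [ih, hM, List.filter_cons]
      simp only [if_neg hnM, List.nil_append]
      by_cases h2 : pvFmax t v = v
      · simp [h2]
      · have : ¬ ((v == pvFmax t v) = true) := by simp; omega
        simp [h2, this]
    · have hM : pvFmax ((c, v) :: t) n = pvFmax t n := by rw [hfm, if_neg h1]
      by_cases h2 : v = n
      · rw [show vainqueurAltGo ((c, v) :: t) n r = vainqueurAltGo t n (r ++ [c]) by
          simp [vainqueurAltGo, h2]]
        rw [ih, hM, List.filter_cons]
        by_cases h3 : pvFmax t n = n
        · simp [h3, h2]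
        · have hne : ¬ ((v == pvFmax t n) = true) := by
            simp [h2]; exact fun he => h3 he.symm
          simp [h3, hne]
      · have hv : v < n := by omega
        rw [show vainqueurAltGo ((c, v) :: t) n r = vainqueurAltGo t n r by
          simp [vainqueurAltGo, h1, h2]]
        rw [ih, hM, List.filter_cons]
        have hnM : n ≤ pvFmax t n := pvFmax_le t n
        have : ¬ ((v == pvFmax t n) = true) := by simp; omega
        simp [this]

-- ===== VERDICT (by name: the statement is the Claim_ definition above) =====
theorem vainqueur_spec : Claim_equal_vainqueur := by
  intro election _
  unfold Spec_vainqueur vainqueur vainqueur_alt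
  rw [vainqueurAltGo_spec]
  simp [pvFmax]
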